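-- pv_equiv track=rewrite | github.com/mala-lab/GGAD | src/utils.py | pos_neg_split
-- ===== SOURCE A (Python) =====
-- import copy as cp
--
-- def pos_neg_split(nodes, labels):
--     """
-- 	Find positive and negative nodes given a list of nodes and their labels
-- 	:param nodes: a list of nodes
-- 	:param labels: a list of node labels
-- 	:returns: the spited positive and negative nodes
-- 	"""
--     pos_nodes = []
--     neg_nodes = cp.deepcopy(nodes)
--     aux_nodes = cp.deepcopy(nodes)
--     for idx, label in enumerate(labels):
--         if label == 1:
--             pos_nodes.append(aux_nodes[idx])
--             neg_nodes.remove(aux_nodes[idx])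
--
--     return pos_nodes, neg_nodes
-- ===== SOURCE B (Python) =====
-- def pos_neg_split(nodes, labels):
--     """Same result as A, in one pass: count how many copies of each value the
--     positive nodes take, then scan nodes once skipping that many occurrences."""
--     pos_nodes = [nodes[i] for i, label in enumerate(labels) if label == 1]
--     skip = {}
--     for v in pos_nodes:
--         skip[v] = skip.get(v, 0) + 1
--     neg_nodes = []
--     for v in nodes:
--         c = skip.get(v, 0)
--         if c > 0:
--             skip[v] = c - 1
--         else:
--             neg_nodes.append(v)
--     return pos_nodes, neg_nodes
-- ===== Notes on version B (the rewrite author's own statement) =====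
-- stated objective: faster
-- what changed: Replaces the repeated list.remove scans (and the two deepcopies) by a counting dict built once and a single skip-first-c_v-occurrences pass over nodes.
import Mathlib
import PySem

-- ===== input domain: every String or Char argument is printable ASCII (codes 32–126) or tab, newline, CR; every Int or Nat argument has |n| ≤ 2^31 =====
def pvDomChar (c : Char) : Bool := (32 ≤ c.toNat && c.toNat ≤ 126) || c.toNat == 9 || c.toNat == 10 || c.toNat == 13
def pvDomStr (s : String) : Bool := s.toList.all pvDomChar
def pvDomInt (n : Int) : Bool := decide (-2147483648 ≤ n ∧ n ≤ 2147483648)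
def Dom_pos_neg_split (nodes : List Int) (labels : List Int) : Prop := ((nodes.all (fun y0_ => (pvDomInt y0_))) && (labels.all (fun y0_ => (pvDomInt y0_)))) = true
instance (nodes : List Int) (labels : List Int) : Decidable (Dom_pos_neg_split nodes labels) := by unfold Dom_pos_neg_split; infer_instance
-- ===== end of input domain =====

-- B replaces A's repeated list.remove scans (and the two deepcopies) by a counting
-- dict built once plus a single skip-pass over nodes; same return value wherever A returns.

-- ===== PORT A =====
def pos_neg_split (nodes : List Int) (labels : List Int) : List Int × List Int :=
  (PySem.List.enumerate labels 0).foldl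
    (fun (st : List Int × List Int) p =>
      if p.2 == (1 : Int) then
        match PySem.List.pyGet? nodes p.1 with
        | some v => (st.1 ++ [v], (PySem.List.remove? st.2 v).getD st.2)
        | none => st          -- Python raises IndexError here; excluded by Pre_
      else st)
    ([], nodes)

-- ===== PORT B =====
def pos_neg_split_alt (nodes : List Int) (labels : List Int) : List Int × List Int :=
  let pos := (PySem.List.enumerate labels 0).foldl
    (fun (acc : List Int) p =>
      if p.2 == (1 : Int) then
        match PySem.List.pyGet? nodes p.1 with
        | some v => acc ++ [v]
        | none => acc         -- Python raises IndexError here; excluded by Pre_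
      else acc) []
  let skip := pos.foldl (fun (d : PySem.Dict Int Int) v => d.insert v (d.getD v 0 + 1)) PySem.Dict.empty
  let st := nodes.foldl
    (fun (st : PySem.Dict Int Int × List Int) v =>
      let c := st.1.getD v 0
      if 0 < c then (st.1.insert v (c - 1), st.2)
      else (st.1, st.2 ++ [v])) (skip, [])
  (pos, st.2)

-- ===== PRECONDITION & SPEC =====
-- Pre_ excludes exactly the inputs where A raises IndexError: a label equal to 1
-- at an index that is out of range for nodes.
def Pre_pos_neg_split (nodes : List Int) (labels : List Int) : Prop :=
  ∀ p ∈ PySem.List.enumerate labels 0, p.2 = 1 → p.1 < (nodes.length : Int)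
instance (nodes : List Int) (labels : List Int) : Decidable (Pre_pos_neg_split nodes labels) := by unfold Pre_pos_neg_split; infer_instance

def pvWitness_pos_neg_split : List Int × List Int := ([5, 7, 5, 9], [1, 0, 1])

def Spec_pos_neg_split (nodes : List Int) (labels : List Int) (out : List Int × List Int) : Prop := out = pos_neg_split_alt nodes labels
instance (nodes : List Int) (labels : List Int) (out : List Int × List Int) : Decidable (Spec_pos_neg_split nodes labels out) := by unfold Spec_pos_neg_split; infer_instance

-- ===== CLAIM (what is proved, stated in full; the proofs are below) =====
def Claim_equal_pos_neg_split : Prop := ∀ (nodes : List Int) (labels : List Int), Dom_pos_neg_split nodes labels → Pre_pos_neg_split nodes labels → Spec_pos_neg_split nodes labels (pos_neg_split nodes labels)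

-- ===== LEMMAS AND PROOFS =====

-- A's list.remove never fails under Pre_, and whether it fails or not its
-- getD-completed effect is List.erase (erase is a no-op on an absent value).
theorem rem1_eq_erase (l : List Int) (v : Int) : (PySem.List.remove? l v).getD l = l.erase v := by
  by_cases h : v ∈ l
  · rw [PySem.List.remove?_eq_some_erase l v h]; rfl
  · rw [(PySem.List.remove?_eq_none_iff l v).mpr h, Option.getD_none, List.erase_of_not_mem h]

-- the positive values extracted from an enumerate list, structurally
def posList (nodes : List Int) : List (Int × Int) → List Int
  | [] => []
  | p :: E =>
    if p.2 == (1 : Int) then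
      match PySem.List.pyGet? nodes p.1 with
      | some v => v :: posList nodes E
      | none => posList nodes E
    else posList nodes E

-- the one-pass skip, abstracted over a count function
def spf (f : Int → Int) : List Int → List Int
  | [] => []
  | x :: xs => if 0 < f x then spf (fun w => if w = x then f x - 1 else f w) xs
               else x :: spf f xs

theorem spf_congr {f g : Int → Int} (h : ∀ w, f w = g w) (xs : List Int) :
    spf f xs = spf g xs := by
  have : f = g := funext h
  rw [this]

theorem posfold (nodes : List Int) (E : List (Int × Int)) (acc : List Int) :
    E.foldl (fun (acc : List Int) p =>
      if p.2 == (1 : Int) then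
        match PySem.List.pyGet? nodes p.1 with
        | some v => acc ++ [v]
        | none => acc
      else acc) acc = acc ++ posList nodes E := by
  induction E generalizing acc with
  | nil => simp [posList]
  | cons p E ih =>
    rw [List.foldl_cons]
    by_cases h : (p.2 == (1 : Int)) = true
    · cases hg : PySem.List.pyGet? nodes p.1 with
      | some v =>
        simp only [posList, h, hg, if_true]
        rw [ih, List.append_assoc]
        rfl
      | none =>
        simp only [posList, h, hg, if_true]
        rw [ih]
    · simp only [posList, if_neg h]
      rw [ih]

theorem afold (nodes : List Int) (E : List (Int × Int)) (p0 n0 : List Int) :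
    E.foldl (fun (st : List Int × List Int) p =>
      if p.2 == (1 : Int) then
        match PySem.List.pyGet? nodes p.1 with
        | some v => (st.1 ++ [v], (PySem.List.remove? st.2 v).getD st.2)
        | none => st
      else st) (p0, n0)
    = (p0 ++ posList nodes E, (posList nodes E).foldl (fun l v => l.erase v) n0) := by
  induction E generalizing p0 n0 with
  | nil => simp [posList]
  | cons p E ih =>
    rw [List.foldl_cons]
    by_cases h : (p.2 == (1 : Int)) = true
    · cases hg : PySem.List.pyGet? nodes p.1 with
      | some v =>
        simp only [posList, h, hg, if_true]
        rw [rem1_eq_erase n0 v, ih, List.append_assoc]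
        rfl
      | none =>
        simp only [posList, h, hg, if_true]
        rw [ih]
    · simp only [posList, if_neg h]
      rw [ih]

theorem bfold (d : PySem.Dict Int Int) (acc : List Int) (xs : List Int) :
    (xs.foldl (fun (st : PySem.Dict Int Int × List Int) v =>
      let c := st.1.getD v 0
      if 0 < c then (st.1.insert v (c - 1), st.2)
      else (st.1, st.2 ++ [v])) (d, acc)).2
    = acc ++ spf (fun w => d.getD w 0) xs := by
  induction xs generalizing d acc with
  | nil => simp [spf]
  | cons x xs ih =>
    simp only [List.foldl_cons, spf]
    by_cases h : 0 < d.getD x 0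
    · simp only [h, if_true, ih]
      congr 1
      apply spf_congr
      intro w
      rw [PySem.Dict.getD_insert]
    · simp [h, ih]

theorem spf_zero (xs : List Int) : spf (fun _ => 0) xs = xs := by
  induction xs with
  | nil => rfl
  | cons x xs ih => simp [spf, ih]

-- erasing the first v from the skip result = skipping one more occurrence of v
theorem spf_cons_pos (f : Int → Int) (x : Int) (xs : List Int) (h : 0 < f x) :
    spf f (x :: xs) = spf (fun w => if w = x then f x - 1 else f w) xs := by
  simp only [spf, if_pos h]

theorem spf_cons_neg (f : Int → Int) (x : Int) (xs : List Int) (h : ¬ 0 < f x) :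
    spf f (x :: xs) = x :: spf f xs := by
  simp only [spf, if_neg h]

-- erasing the first v from the skip result = skipping one more occurrence of v
theorem erase_spf (xs : List Int) (f : Int → Int) (v : Int) (hf : ∀ w, 0 ≤ f w) :
    (spf f xs).erase v = spf (fun w => if w = v then f v + 1 else f w) xs := by
  induction xs generalizing f with
  | nil => simp [spf]
  | cons x xs ih =>
    by_cases hxv : x = v
    · subst hxv
      have hfx := hf x
      have hpos2 : 0 < (fun w => if w = x then f x + 1 else f w) x := by simp; omega
      by_cases h : 0 < f x
      · have hf' : ∀ w, 0 ≤ (fun w => if w = x then f x - 1 else f w) w := by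
          intro w
          by_cases hw : w = x
          · simp [hw]; omega
          · simp [hw]; exact hf w
        rw [spf_cons_pos f x xs h, ih _ hf', spf_cons_pos _ x xs hpos2]
        apply spf_congr
        intro w
        by_cases hw : w = x
        · subst hw; simp
        · simp [hw]
      · rw [spf_cons_neg f x xs h, List.erase_cons_head, spf_cons_pos _ x xs hpos2]
        apply spf_congr
        intro w
        by_cases hw : w = x
        · subst hw; simp
        · simp [hw]
    · have hvx : ¬ v = x := fun hc => hxv hc.symm
      by_cases h : 0 < f x
      · have hf' : ∀ w, 0 ≤ (fun w => if w = x then f x - 1 else f w) w := by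
          intro w
          by_cases hw : w = x
          · simp [hw]; omega
          · simp [hw]; exact hf w
        have hgpos : 0 < (fun w => if w = v then f v + 1 else f w) x := by simpa [hxv] using h
        rw [spf_cons_pos f x xs h, ih _ hf', spf_cons_pos _ x xs hgpos]
        apply spf_congr
        intro w
        by_cases hwv : w = v
        · subst hwv; simp [hvx]
        · by_cases hwx : w = x
          · subst hwx; simp [hxv]
          · simp [hwv, hwx]
      · have hgneg : ¬ 0 < (fun w => if w = v then f v + 1 else f w) x := by simpa [hxv] using h
        rw [spf_cons_neg f x xs h, List.erase_cons, if_neg (by simp [hxv]), ih f hf,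
          spf_cons_neg _ x xs hgneg]

-- repeated first-occurrence erasure = one counting skip-pass
theorem core (vs xs : List Int) :
    vs.foldl (fun l v => l.erase v) xs = spf (fun w => (vs.count w : Int)) xs := by
  induction vs using List.reverseRecOn with
  | nil => simp [spf_zero]
  | append_singleton vs v ih =>
    rw [List.foldl_append, List.foldl_cons, List.foldl_nil, ih,
      erase_spf xs _ v (fun w => by positivity)]
    apply spf_congr
    intro w
    by_cases hw : w = v
    · subst hw; simp [List.count_append]
    · simp [List.count_append, List.count_eq_zero, hw]

-- ===== VERDICT (by name: the statement is the Claim_ definition above) =====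
theorem pos_neg_split_spec : Claim_equal_pos_neg_split := by
  intro nodes labels _ _
  unfold Spec_pos_neg_split
  simp only [pos_neg_split, pos_neg_split_alt]
  rw [afold, posfold, bfold, core]
  simp only [List.nil_append]
  congr 1
  apply spf_congr
  intro w
  rw [show ((posList nodes (PySem.List.enumerate labels 0)).foldl
        (fun (d : PySem.Dict Int Int) v => d.insert v (d.getD v 0 + 1)) PySem.Dict.empty).getD w 0
      = PySem.Dict.empty.getD w 0 + ((posList nodes (PySem.List.enumerate labels 0)).count w : Int)
    from PySem.Dict.getD_foldl_insert_add_one _ _ _]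
  simp [PySem.Dict.getD_empty]
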